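-- pv_equiv track=rewrite | github.com/INK-IHEP/fastink-code | src/apps/user_dashboard/get_ccs_used.py | average_assign
-- ===== SOURCE A (Python) =====
-- def average_assign(source, n):
--     result = []
--     remainder = len(source) % n
--     number = len(source) // n
--     offset = 0
--
--     for i in range(n):
--         index = i * number + offset
--         result.append(source[index])
--         if remainder > 0:
--             remainder -= 1
--             offset += 1
--
--     return result
-- ===== SOURCE B (Python) =====
-- def average_assign(source, n):
--     number, remainder = divmod(len(source), n)
--     result = []
--     start = 0
--     for i in range(n):
--         size = number + (1 if i < remainder else 0)
--         chunk = source[start:start + size]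
--         result.append(chunk[0])
--         start += size
--     return result
-- ===== Notes on version B (the rewrite author's own statement) =====
-- stated objective: alternative
-- what changed: B reconstructs the balanced partition itself: divmod once, then per partition computes its size, slices the chunk out of the list and takes the chunk's head, maintaining a running start offset, instead of A's pure index arithmetic with a decrementing remainder counter.
import Mathlib
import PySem

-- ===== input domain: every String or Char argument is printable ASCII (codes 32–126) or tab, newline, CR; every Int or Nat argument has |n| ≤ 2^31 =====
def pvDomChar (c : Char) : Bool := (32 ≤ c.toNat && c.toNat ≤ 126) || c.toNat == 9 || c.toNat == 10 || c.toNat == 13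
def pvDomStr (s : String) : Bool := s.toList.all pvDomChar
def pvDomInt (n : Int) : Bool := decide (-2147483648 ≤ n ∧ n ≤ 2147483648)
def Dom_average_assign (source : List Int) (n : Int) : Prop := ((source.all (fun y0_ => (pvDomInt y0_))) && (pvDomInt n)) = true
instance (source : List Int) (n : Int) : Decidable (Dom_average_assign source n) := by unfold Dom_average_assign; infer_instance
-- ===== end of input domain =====

-- B picks one element per balanced partition by reconstructing the partitions (divmod once, then
-- per-partition size, slice the chunk, take its head) instead of A's pure index arithmetic.

-- ===== PORT A =====
def average_assign (source : List Int) (n : Int) : List Int :=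
  let remainder := PySem.Int.mod (source.length : Int) n
  let number := PySem.Int.floordiv (source.length : Int) n
  (((PySem.List.pyRange 0 n 1).foldl
      (fun (st : List Int × Int × Int) i =>
        match st with
        | (result, remainder, offset) =>
          let index := i * number + offset
          let result := result ++ [PySem.List.pyGetD source index 0]
          if remainder > 0 then (result, remainder - 1, offset + 1)
          else (result, remainder, offset))
      ([], remainder, 0))).1

-- ===== PORT B =====
def average_assign_alt (source : List Int) (n : Int) : List Int :=
  match PySem.Int.divmod? (source.length : Int) n with
  | none => []   -- n = 0: ZeroDivisionError in Python, excluded by Pre_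
  | some (number, remainder) =>
    (((PySem.List.pyRange 0 n 1).foldl
        (fun (st : List Int × Int) i =>
          match st with
          | (result, start) =>
            let size := number + (if i < remainder then 1 else 0)
            let chunk := PySem.List.slice source (some start) (some (start + size))
            (result ++ [PySem.List.pyGetD chunk 0 0], start + size))
        ([], 0))).1

-- ===== PRECONDITION & SPEC =====
-- Pre_ excludes exactly the inputs where Python A raises: n = 0 (ZeroDivisionError) and
-- 0 < n with more partitions than elements (IndexError).  B raises on those same inputs.
def Pre_average_assign (source : List Int) (n : Int) : Prop :=
  n < 0 ∨ (0 < n ∧ n ≤ (source.length : Int))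
instance (source : List Int) (n : Int) : Decidable (Pre_average_assign source n) := by
  unfold Pre_average_assign; infer_instance
def pvWitness_average_assign : List Int × Int := ([1, 2, 3], 2)

def Spec_average_assign (source : List Int) (n : Int) (out : List Int) : Prop := out = average_assign_alt source n
instance (source : List Int) (n : Int) (out : List Int) : Decidable (Spec_average_assign source n out) := by unfold Spec_average_assign; infer_instance

-- ===== CLAIM (what is proved, stated in full; the proofs are below) =====
def Claim_equal_average_assign : Prop := ∀ (source : List Int) (n : Int), Dom_average_assign source n → Pre_average_assign source n → Spec_average_assign source n (average_assign source n)

-- ===== LEMMAS AND PROOFS =====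

-- A's loop body, as a named step function (definitionally the lambda in the port of A).
def stepA (source : List Int) (number : Int) (st : List Int × Int × Int) (i : Int) :
    List Int × Int × Int :=
  match st with
  | (result, remainder, offset) =>
    let index := i * number + offset
    let result := result ++ [PySem.List.pyGetD source index 0]
    if remainder > 0 then (result, remainder - 1, offset + 1)
    else (result, remainder, offset)

-- B's loop body, as a named step function (definitionally the lambda in the port of B).
def stepB (source : List Int) (number remainder : Int) (st : List Int × Int) (i : Int) :
    List Int × Int :=
  match st with
  | (result, start) =>
    let size := number + (if i < remainder then 1 else 0)
    let chunk := PySem.List.slice source (some start) (some (start + size))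
    (result ++ [PySem.List.pyGetD chunk 0 0], start + size)

lemma getD_take_drop (xs : List Int) (s t : Nat) (ht : 0 < t) :
    ((xs.drop s).take t).getD 0 0 = xs.getD s 0 := by
  simp [List.getD_eq_getElem?_getD, List.getElem?_drop, ht]

-- the head of a nonempty chunk source[start:start+size] is source[start]
lemma chunk_head (source : List Int) (start size : Int)
    (h0 : 0 ≤ start) (hs : 1 ≤ size) :
    PySem.List.pyGetD (PySem.List.slice source (some start) (some (start + size))) 0 0
      = PySem.List.pyGetD source start 0 := by
  rw [PySem.List.slice_toNat source h0 (by omega)]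
  rw [PySem.List.pyGetD_zero, getD_take_drop _ _ _ (by omega)]
  rw [PySem.List.pyGetD_of_nonneg]; exact h0

-- loop invariant: after i iterations A's state is (res, r - min i r, min i r) and B's is
-- (res, i*q + min i r); the remaining iterations produce the same result list.
lemma loop_eq (source : List Int) (n q r : Int)
    (_hn : 0 < n) (hr0 : 0 ≤ r) (hrn : r < n) (hq : 1 ≤ q) :
    ∀ (k : Nat) (i : Int) (res : List Int), 0 ≤ i → i ≤ n → (n - i).toNat = k →
      (((PySem.List.pyRange i n 1).foldl (stepA source q) (res, r - min i r, min i r))).1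
        = (((PySem.List.pyRange i n 1).foldl (stepB source q r) (res, i * q + min i r))).1 := by
  intro k
  induction k with
  | zero =>
    intro i res h0 h1 hk
    rw [PySem.List.pyRange_one_eq_nil (by omega)]
    rfl
  | succ k ih =>
    intro i res h0 h1 hk
    rw [PySem.List.pyRange_one_cons (by omega)]
    simp only [List.foldl_cons]
    have hsz : (1:Int) ≤ q + (if i < r then 1 else 0) := by split_ifs <;> omega
    have hA : stepA source q (res, r - min i r, min i r) i
        = (res ++ [PySem.List.pyGetD source (i * q + min i r) 0],
           r - min (i+1) r, min (i+1) r) := by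
      simp only [stepA]
      by_cases hir : i < r
      · rw [if_pos (by omega)]
        have h1 : min i r = i := by omega
        have h2 : min (i+1) r = i + 1 := by omega
        simp [h1, h2]; omega
      · rw [if_neg (by omega)]
        have h1 : min i r = r := by omega
        have h2 : min (i+1) r = r := by omega
        simp [h1, h2]
    have hB : stepB source q r (res, i * q + min i r) i
        = (res ++ [PySem.List.pyGetD source (i * q + min i r) 0],
           (i+1) * q + min (i+1) r) := by
      simp only [stepB, Prod.mk.injEq]
      refine ⟨?_, ?_⟩
      · rw [chunk_head _ _ _ (by positivity) hsz]
      · by_cases hir : i < r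
        · have h1 : min i r = i := by omega
          have h2 : min (i+1) r = i + 1 := by omega
          rw [if_pos hir, h1, h2]; ring
        · have h1 : min i r = r := by omega
          have h2 : min (i+1) r = r := by omega
          rw [if_neg hir, h1, h2]; ring
    rw [hA, hB]
    exact ih (i+1) _ (by omega) (by omega) (by omega)

-- ===== VERDICT (by name: the statement is the Claim_ definition above) =====
theorem average_assign_spec : Claim_equal_average_assign := by
  unfold Claim_equal_average_assign Spec_average_assign
  intro source n _hdom hpre
  rcases hpre with hneg | ⟨hpos, hle⟩
  · -- n < 0: both loops are empty, both return []
    unfold average_assign average_assign_alt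
    have hne : n ≠ 0 := by omega
    simp [PySem.List.pyRange_one_eq_nil (by omega : n ≤ (0:Int))]
    split <;> rfl
  · have hdm : PySem.Int.divmod? (source.length : Int) n
        = some (PySem.Int.floordiv (source.length : Int) n,
                PySem.Int.mod (source.length : Int) n) := by
      have hne : n ≠ 0 := by omega
      simp [PySem.Int.divmod?, PySem.Int.floordiv, PySem.Int.mod, hne]
    have hr : 0 ≤ PySem.Int.mod (source.length : Int) n
        ∧ PySem.Int.mod (source.length : Int) n < n := by
      rw [PySem.Int.mod_eq_emod_of_pos (h := hpos)]
      exact ⟨Int.emod_nonneg _ (by omega), Int.emod_lt_of_pos _ hpos⟩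
    have hq : 1 ≤ PySem.Int.floordiv (source.length : Int) n := by
      rw [PySem.Int.le_floordiv_iff_mul_le (hb := hpos)]; omega
    have key := loop_eq source n _ _ hpos hr.1 hr.2 hq n.toNat 0 []
      le_rfl (le_of_lt hpos) (by omega)
    have hmin : min (0:Int) (PySem.Int.mod (source.length : Int) n) = 0 := by omega
    rw [hmin, sub_zero, zero_mul, zero_add] at key
    have halt : average_assign_alt source n
        = (((PySem.List.pyRange 0 n 1).foldl
            (stepB source (PySem.Int.floordiv (source.length : Int) n)
              (PySem.Int.mod (source.length : Int) n)) ([], 0))).1 := by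
      unfold average_assign_alt
      rw [hdm]
      rfl
    exact key.trans halt.symm
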